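-- pv_equiv track=rewrite | github.com/limar63/study_folder | PythonPrograms/Lisp-eval-apply/lisp-eval-apply.py | equal_func
-- ===== SOURCE A (Python) =====
-- class LispInterException(ValueError):pass
--
-- def equal_func(args):
--     #we check that all arguments is int. If not:
--     if not all(isinstance(x, int) for x in args):
--             #rasing exception
--             raise LispInterException("Exception: you can only use 'Equal' with int elements")
--     #all arguments are int
--     else:
--         #we are going through arguments length except last element (because we check current element and next element)
--         for i in range(len(args) - 1):
--             #we check current element and the next element if they are not equal
--             if args[i] != args[i + 1]:
--                 #the moment we get an element that is not equal to the next one - we return false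
--                 return '#f'
--         #check for not equal element didn't work, so we return true after going through whole argument list
--         return '#t'
-- ===== SOURCE B (Python) =====
-- class LispInterException(ValueError):pass
--
-- def equal_func(args):
--     if not all(isinstance(x, int) for x in args):
--         raise LispInterException("Exception: you can only use 'Equal' with int elements")
--     return '#t' if len(set(args)) <= 1 else '#f'
-- ===== Notes on version B (the rewrite author's own statement) =====
-- stated objective: simpler
-- what changed: Replaces the indexed adjacent-pair scan with early return by building a set of the arguments and deciding on its cardinality (<= 1 means all equal).
import Mathlib
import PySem

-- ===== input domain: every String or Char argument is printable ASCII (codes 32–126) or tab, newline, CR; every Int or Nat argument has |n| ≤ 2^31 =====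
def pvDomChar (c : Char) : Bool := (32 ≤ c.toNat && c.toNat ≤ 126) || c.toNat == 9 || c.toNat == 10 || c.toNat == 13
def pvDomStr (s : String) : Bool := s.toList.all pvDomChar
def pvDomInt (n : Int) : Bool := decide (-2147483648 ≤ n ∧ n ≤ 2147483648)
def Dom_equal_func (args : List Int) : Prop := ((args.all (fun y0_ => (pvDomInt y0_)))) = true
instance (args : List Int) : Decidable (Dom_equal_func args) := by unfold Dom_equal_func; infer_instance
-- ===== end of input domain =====

-- B replaces A's indexed adjacent-pair scan (early return) by a set-cardinality check: simpler, same cost.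


-- ===== PORT A =====
-- A's isinstance guard always passes (every argument is an Int here), so the raise branch is unreachable.
-- The 'for i in range(len(args)-1): if args[i] != args[i+1]: return "#f"' loop walks adjacent pairs:
def equalFuncLoop : List Int → String
  | a :: b :: rest => if a ≠ b then "#f" else equalFuncLoop (b :: rest)
  | _ => "#t"

def equal_func (args : List Int) : String := equalFuncLoop args

-- ===== PORT B =====
-- Source B: return '#t' if len(set(args)) <= 1 else '#f'
def equal_func_alt (args : List Int) : String :=
  if PySem.Set.len (PySem.Set.ofList args) ≤ 1 then "#t" else "#f"

-- ===== PRECONDITION & SPEC =====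
def Spec_equal_func (args : List Int) (out : String) : Prop := out = equal_func_alt args
instance (args : List Int) (out : String) : Decidable (Spec_equal_func args out) := by unfold Spec_equal_func; infer_instance

-- ===== CLAIM (what is proved, stated in full; the proofs are below) =====
def Claim_equal_equal_func : Prop := ∀ (args : List Int), Dom_equal_func args → Spec_equal_func args (equal_func args)

-- ===== LEMMAS AND PROOFS =====
theorem equalFuncLoop_eq_tt (a : Int) (l : List Int) :
    equalFuncLoop (a :: l) = "#t" ↔ ∀ x ∈ l, x = a := by
  induction l generalizing a with
  | nil => simp [equalFuncLoop]
  | cons b rest ih =>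
    by_cases hab : a = b
    · subst hab
      simp only [equalFuncLoop]
      rw [if_neg (by omega : ¬ a ≠ a), ih]
      constructor
      · intro h x hx
        rcases List.mem_cons.mp hx with rfl | hx'
        · rfl
        · exact h x hx'
      · intro h x hx; exact h x (List.mem_cons_of_mem _ hx)
    · simp only [equalFuncLoop, if_pos hab]
      constructor
      · intro h; simp at h
      · intro h; exact absurd (h b (by simp)).symm hab

theorem ofList_all_eq (a : Int) (l : List Int) (h : ∀ x ∈ l, x = a) :
    PySem.Set.ofList (a :: l) = [a] := by
  rw [PySem.Set.ofList_eq_foldl]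
  show List.foldl PySem.Set.add [a] l = [a]
  induction l with
  | nil => rfl
  | cons b rest ih =>
    have hb : b = a := h b (by simp)
    subst hb
    have hadd : PySem.Set.add [b] b = [b] := PySem.Set.add_of_mem (by simp)
    simp only [List.foldl_cons, hadd]
    exact ih (fun x hx => h x (List.mem_cons_of_mem _ hx))

theorem equalFuncLoop_tt_or_ff (l : List Int) :
    equalFuncLoop l = "#t" ∨ equalFuncLoop l = "#f" := by
  induction l with
  | nil => left; rfl
  | cons a rest ih =>
    cases rest with
    | nil => left; rfl
    | cons b t =>
      by_cases hab : a ≠ b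
      · right; simp [equalFuncLoop, if_pos hab]
      · have : equalFuncLoop (a :: b :: t) = equalFuncLoop (b :: t) := by
          simp [equalFuncLoop, if_neg hab]
        rw [this]; exact ih

theorem loop_eq_alt (args : List Int) : equal_func args = equal_func_alt args := by
  cases args with
  | nil => rfl
  | cons a l =>
    by_cases h : ∀ x ∈ l, x = a
    · have hA : equal_func (a :: l) = "#t" := (equalFuncLoop_eq_tt a l).mpr h
      have hS : PySem.Set.ofList (a :: l) = [a] := ofList_all_eq a l h
      rw [hA, equal_func_alt, hS]
      rfl
    · push Not at h
      obtain ⟨x, hx, hxa⟩ := h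
      have hA : equal_func (a :: l) ≠ "#t" := by
        rw [equal_func]
        intro hc
        exact hxa ((equalFuncLoop_eq_tt a l).mp hc x hx)
      have hAf : equal_func (a :: l) = "#f" := by
        rcases equalFuncLoop_tt_or_ff (a :: l) with h1 | h1
        · exact absurd h1 hA
        · exact h1
      -- the set contains both a and x, distinct, and is nodup ⇒ its length ≥ 2
      have hma : a ∈ PySem.Set.ofList (a :: l) := (PySem.Set.mem_ofList _ _).mpr (by simp)
      have hmx : x ∈ PySem.Set.ofList (a :: l) := (PySem.Set.mem_ofList _ _).mpr (by simp [hx])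
      have hlen : ¬ PySem.Set.len (PySem.Set.ofList (a :: l)) ≤ 1 := by
        intro hle
        match hs : PySem.Set.ofList (a :: l) with
        | [] => rw [hs] at hma; simp at hma
        | [y] =>
          rw [hs] at hma hmx
          simp at hma hmx
          exact hxa (hmx.trans hma.symm)
        | y :: z :: t =>
          rw [hs] at hle
          simp [PySem.Set.len] at hle
          omega
      rw [hAf, equal_func_alt, if_neg hlen]

-- ===== VERDICT (by name: the statement is the Claim_ definition above) =====
theorem equal_func_spec : Claim_equal_equal_func := by
  intro args _
  exact loop_eq_alt args
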